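-- pv_equiv track=rewrite | github.com/openMSX/openMSX | Contrib/tas/omr2txt.py | combineEvents
-- ===== SOURCE A (Python) =====
-- from collections import defaultdict
--
-- def combineEvents(inputEvents):
-- 	'''Combines multiple events on the same keyboard row at the same timestamp
-- 	into a single event.
-- 	'''
-- 	pendingTime = None
--
-- 	def outputPending():
-- 		if pendingTime is not None:
-- 			for row in sorted(pressForRow.keys() | releaseForRow.keys()):
-- 				press = pressForRow[row]
-- 				release = releaseForRow[row]
-- 				if press != 0 or release != 0:
-- 					yield pendingTime, row, press, release
--
-- 	for time, row, press, release in inputEvents: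
-- 		if time != pendingTime:
-- 			assert pendingTime is None or time > pendingTime, time
--
-- 			# Output previous event.
-- 			yield from outputPending()
--
-- 			# Start new event.
-- 			pendingTime = time
-- 			pressForRow = defaultdict(int)
-- 			releaseForRow = defaultdict(int)
--
-- 		pressForRow[row] = (pressForRow[row] | press) & ~release
-- 		releaseForRow[row] = (releaseForRow[row] | release) & ~press
-- 	else:
-- 		yield from outputPending()
-- ===== SOURCE B (Python) =====
-- def combineEvents(inputEvents):
-- 	'''Combines multiple events on the same keyboard row at the same timestamp
-- 	into a single event.
-- 	Sort-then-scan rewrite: one global stable sort by (time, row) brings all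
-- 	events of the same timestamp/row next to each other, a single linear pass
-- 	merges adjacent equal-(time, row) entries with the bitmask update, and a
-- 	final filter drops the rows whose combined masks are both zero.
-- 	'''
-- 	events = sorted(inputEvents, key=lambda e: (e[0], e[1]))
-- 	merged = []
-- 	for time, row, press, release in events:
-- 		if merged and merged[-1][0] == time and merged[-1][1] == row:
-- 			_, _, p, r = merged[-1]
-- 			merged[-1] = (time, row, (p | press) & ~release,
-- 						  (r | release) & ~press)
-- 		else:
-- 			merged.append((time, row, press & ~release,
-- 						   release & ~press))
-- 	return [e for e in merged if e[2] != 0 or e[3] != 0]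
-- ===== Notes on version B (the rewrite author's own statement) =====
-- stated objective: alternative
-- what changed: Replaces A's streaming state machine (two defaultdicts per timestamp group, lazily flushed in sorted key order when the timestamp changes or the input ends) by a sort-then-scan pipeline: one global stable sort by (time, row), one linear pass merging adjacent equal-(time,row) entries with the bitmask update, and a final filter dropping all-zero rows; no dict and no per-group sort remain.
import Mathlib
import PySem

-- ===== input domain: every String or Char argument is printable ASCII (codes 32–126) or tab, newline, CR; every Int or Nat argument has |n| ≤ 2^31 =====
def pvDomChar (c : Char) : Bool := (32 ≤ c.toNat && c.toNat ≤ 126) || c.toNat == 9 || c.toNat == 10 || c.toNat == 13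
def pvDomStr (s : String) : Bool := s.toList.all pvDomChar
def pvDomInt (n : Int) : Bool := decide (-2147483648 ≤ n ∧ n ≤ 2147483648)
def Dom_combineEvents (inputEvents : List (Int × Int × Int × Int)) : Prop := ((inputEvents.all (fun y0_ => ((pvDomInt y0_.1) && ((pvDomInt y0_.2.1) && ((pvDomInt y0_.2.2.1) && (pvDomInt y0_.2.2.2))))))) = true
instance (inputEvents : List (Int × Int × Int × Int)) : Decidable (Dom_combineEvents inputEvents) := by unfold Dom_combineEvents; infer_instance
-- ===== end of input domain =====

-- B replaces A's streaming dict-per-timestamp state machine by a sort-then-scan pipeline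
-- (one global stable sort by (time, row), one adjacent-merge pass, one final filter);
-- return values agree wherever A returns (A raises AssertionError on a timestamp decrease,
-- excluded by Pre_).

-- ===== PORT A =====

-- A's outputPending: iterate the sorted union of the two defaultdicts' key sets,
-- yield the rows whose pending press or release mask is nonzero.
def pvOutputPendingA (t : Int) (pd rd : PySem.Dict Int Int) : List (Int × Int × Int × Int) :=
  (PySem.List.sorted (PySem.Set.union (PySem.Set.ofList pd.keys) rd.keys) (fun x => x) false).filterMap
    (fun row =>
      let press := pd.getD row 0
      let release := rd.getD row 0
      if press ≠ 0 ∨ release ≠ 0 then some (t, row, press, release) else none)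

-- one iteration of A's for-loop over (time, row, press, release); state =
-- (pendingTime, pressForRow, releaseForRow, yielded-so-far)
def pvStepA (st : Option Int × PySem.Dict Int Int × PySem.Dict Int Int × List (Int × Int × Int × Int))
    (e : Int × Int × Int × Int) :
    Option Int × PySem.Dict Int Int × PySem.Dict Int Int × List (Int × Int × Int × Int) :=
  let (pending, pd, rd, acc) := st
  let (time, row, press, release) := e
  -- 'if time != pendingTime: yield from outputPending(); start new event'
  -- (the assert is Python's AssertionError; those inputs are excluded by Pre_)
  let (pending, pd, rd, acc) :=
    if some time ≠ pending then
      (some time, PySem.Dict.empty, PySem.Dict.empty,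
        acc ++ (match pending, pd, rd with
                | none, _, _ => []
                | some t, pd, rd => pvOutputPendingA t pd rd))
    else (pending, pd, rd, acc)
  -- pressForRow[row] = (pressForRow[row] | press) & ~release  (and symmetrically)
  (pending,
   pd.insert row (PySem.Int.band (PySem.Int.bor (pd.getD row 0) press) (Int.not release)),
   rd.insert row (PySem.Int.band (PySem.Int.bor (rd.getD row 0) release) (Int.not press)),
   acc)

def combineEvents (inputEvents : List (Int × Int × Int × Int)) : List (Int × Int × Int × Int) :=
  let (pending, pd, rd, acc) :=
    inputEvents.foldl pvStepA (none, PySem.Dict.empty, PySem.Dict.empty, [])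
  -- the for-else: 'yield from outputPending()' after the loop
  acc ++ (match pending, pd, rd with
          | none, _, _ => []
          | some t, pd, rd => pvOutputPendingA t pd rd)

-- ===== PORT B =====

-- B's loop body: either merge into merged[-1] (same time and row) or append the
-- event with its masks normalised from zero.
def pvMergeStep (merged : List (Int × Int × Int × Int)) (e : Int × Int × Int × Int) :
    List (Int × Int × Int × Int) :=
  let (time, row, press, release) := e
  match merged.getLast? with
  | some last =>
      if last.1 == time && last.2.1 == row then
        merged.dropLast ++
          [(time, row,
            PySem.Int.band (PySem.Int.bor last.2.2.1 press) (Int.not release),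
            PySem.Int.band (PySem.Int.bor last.2.2.2 release) (Int.not press))]
      else
        merged ++ [(time, row, PySem.Int.band press (Int.not release),
                    PySem.Int.band release (Int.not press))]
  | none =>
      merged ++ [(time, row, PySem.Int.band press (Int.not release),
                  PySem.Int.band release (Int.not press))]

def combineEvents_alt (inputEvents : List (Int × Int × Int × Int)) : List (Int × Int × Int × Int) :=
  -- events = sorted(inputEvents, key=lambda e: (e[0], e[1]))
  let events := PySem.List.sorted2 inputEvents (fun e => e.1) (fun e => e.2.1) false
  -- the merging for-loop
  let merged := events.foldl pvMergeStep []
  -- [e for e in merged if e[2] != 0 or e[3] != 0]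
  merged.filter (fun e => decide (e.2.2.1 ≠ 0) || decide (e.2.2.2 ≠ 0))

-- ===== PRECONDITION & SPEC =====
-- Pre_ excludes inputs whose timestamps are not nondecreasing: there A raises
-- AssertionError(time) (its assert fires at the first group whose time is not > the previous).
def Pre_combineEvents (inputEvents : List (Int × Int × Int × Int)) : Prop :=
  List.Pairwise (fun a b => a.1 ≤ b.1) inputEvents
instance (inputEvents : List (Int × Int × Int × Int)) : Decidable (Pre_combineEvents inputEvents) := by
  unfold Pre_combineEvents; infer_instance

def pvWitness_combineEvents : (List (Int × Int × Int × Int)) :=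
  [(0, 1, 2, 0), (0, 2, 4, 0), (0, 1, 1, 2), (3, 2, 0, 4), (5, 0, 0, 0)]

def Spec_combineEvents (inputEvents : List (Int × Int × Int × Int)) (out : List (Int × Int × Int × Int)) : Prop := out = combineEvents_alt inputEvents
instance (inputEvents : List (Int × Int × Int × Int)) (out : List (Int × Int × Int × Int)) : Decidable (Spec_combineEvents inputEvents out) := by unfold Spec_combineEvents; infer_instance

-- ===== CLAIM (what is proved, stated in full; the proofs are below) =====
def Claim_equal_combineEvents : Prop := ∀ (inputEvents : List (Int × Int × Int × Int)), Dom_combineEvents inputEvents → Pre_combineEvents inputEvents → Spec_combineEvents inputEvents (combineEvents inputEvents)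

-- ===== LEMMAS AND PROOFS =====

-- ---- canonical grouped form: A's result, one group of equal timestamps at a time ----

-- one combined (press, release) update of a row's pending pair
def pvPRStep (pr : Int × Int) (e : Int × Int × Int × Int) : Int × Int :=
  (PySem.Int.band (PySem.Int.bor pr.1 e.2.2.1) (Int.not e.2.2.2),
   PySem.Int.band (PySem.Int.bor pr.2 e.2.2.2) (Int.not e.2.2.1))

def pvUpdB (d : PySem.Dict Int (Int × Int)) (e : Int × Int × Int × Int) : PySem.Dict Int (Int × Int) :=
  d.insert e.2.1 (pvPRStep (d.getD e.2.1 (0, 0)) e)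

def pvFlushB (t : Int) (d : PySem.Dict Int (Int × Int)) : List (Int × Int × Int × Int) :=
  (PySem.List.sorted d.keys (fun x => x) false).filterMap
    (fun row =>
      let pr := d.getD row (0, 0)
      if pr.1 ≠ 0 ∨ pr.2 ≠ 0 then some (t, row, pr.1, pr.2) else none)

def pvGroupsB : List (Int × Int × Int × Int) → List (Int × Int × Int × Int)
  | [] => []
  | e :: rest =>
      let run := rest.takeWhile (fun e' => e'.1 == e.1)
      let d := (e :: run).foldl pvUpdB PySem.Dict.empty
      pvFlushB e.1 d ++ pvGroupsB (rest.dropWhile (fun e' => e'.1 == e.1))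
  termination_by l => l.length
  decreasing_by
    simp only [List.length_cons]
    exact Nat.lt_succ_of_le (List.length_dropWhile_le _ _)

-- ---- layer 0: A equals the grouped form (projection of B's combined dict onto A's two dicts) ----
def pvMval (f : Int × Int → Int) (d : PySem.Dict Int (Int × Int)) : PySem.Dict Int Int :=
  PySem.Dict.mk (d.items.map (fun p => (p.1, f p.2)))

theorem pv_get?_mval (f : Int × Int → Int) (d : PySem.Dict Int (Int × Int)) (k : Int) :
    (pvMval f d).get? k = (d.get? k).map f := by
  cases d with
  | mk l =>
    induction l with
    | nil => rfl
    | cons p rest ih =>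
      simp only [pvMval] at *
      rw [List.map_cons, PySem.Dict.get?_mk_cons, PySem.Dict.get?_mk_cons]
      by_cases h : p.1 == k
      · simp [h]
      · simp only [h] at *
        simpa using ih

theorem pv_keys_mval (f : Int × Int → Int) (d : PySem.Dict Int (Int × Int)) :
    (pvMval f d).keys = d.keys := by
  simp [pvMval, PySem.Dict.keys]

theorem pv_getD_mval (f : Int × Int → Int) (d : PySem.Dict Int (Int × Int)) (k : Int) (dv : Int × Int) :
    (pvMval f d).getD k (f dv) = f (d.getD k dv) := by
  rw [PySem.Dict.getD_eq_get?_getD, PySem.Dict.getD_eq_get?_getD, pv_get?_mval]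
  cases d.get? k <;> rfl

theorem pv_mval_insert (f : Int × Int → Int) (d : PySem.Dict Int (Int × Int)) (k : Int) (v : Int × Int) :
    pvMval f (d.insert k v) = (pvMval f d).insert k (f v) := by
  apply PySem.Dict.ext
  have hc : (pvMval f d).contains k = d.contains k := by
    rw [PySem.Dict.contains_eq_decide_mem_keys, PySem.Dict.contains_eq_decide_mem_keys, pv_keys_mval]
  have hitems : (pvMval f d).items = d.items.map (fun p => (p.1, f p.2)) := rfl
  have hitems2 : (pvMval f (d.insert k v)).items = (d.insert k v).items.map (fun p => (p.1, f p.2)) := rfl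
  rw [hitems2, PySem.Dict.items_insert, PySem.Dict.items_insert, hc, hitems]
  cases hdc : d.contains k
  · simp only [Bool.false_eq_true, if_false, List.map_append]
    rfl
  · simp only [if_true, List.map_map]
    apply List.map_congr_left
    intro p _
    by_cases hp : p.1 = k <;> simp [hp]

-- the two flushes agree when A's dicts are the projections of B's dict
theorem pv_flush_eq (t : Int) (d : PySem.Dict Int (Int × Int)) (hnd : d.keys.Nodup) :
    pvOutputPendingA t (pvMval Prod.fst d) (pvMval Prod.snd d) = pvFlushB t d := by
  unfold pvOutputPendingA pvFlushB
  rw [pv_keys_mval, pv_keys_mval, show PySem.Set.ofList d.keys = d.keys from PySem.Set.ofList_eq_self_of_nodup _ hnd]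
  have hu : PySem.Set.union d.keys d.keys = d.keys := by
    rw [show PySem.Set.union d.keys d.keys = PySem.Set.update d.keys d.keys from rfl,
        PySem.Set.update_eq_append_filter, List.filter_eq_nil_iff.mpr, List.append_nil]
    intro y hy
    have hmem : y ∈ d.keys := (PySem.List.mem_dedup _ y).mp hy
    simp [hmem]
  rw [hu]
  apply List.filterMap_congr
  intro row _
  have h1 := pv_getD_mval Prod.fst d row (0, 0)
  have h2 := pv_getD_mval Prod.snd d row (0, 0)
  simp only at h1 h2
  simp only [h1, h2]

-- A's loop state finalized by the for-else flush (the same expression combineEvents ends with)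
def pvFinishA (st : Option Int × PySem.Dict Int Int × PySem.Dict Int Int × List (Int × Int × Int × Int)) :
    List (Int × Int × Int × Int) :=
  st.2.2.2 ++ (match st.1, st.2.1, st.2.2.1 with
               | none, _, _ => []
               | some t, pd, rd => pvOutputPendingA t pd rd)

theorem pv_combine_eq_finish (l : List (Int × Int × Int × Int)) :
    combineEvents l = pvFinishA (l.foldl pvStepA (none, PySem.Dict.empty, PySem.Dict.empty, [])) := by
  have h : ∀ st : Option Int × PySem.Dict Int Int × PySem.Dict Int Int × List (Int × Int × Int × Int),
      (let (pending, pd, rd, acc) := st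
       acc ++ (match pending, pd, rd with
               | none, _, _ => []
               | some t, pd, rd => pvOutputPendingA t pd rd)) = pvFinishA st := by
    rintro ⟨p, pd, rd, acc⟩
    cases p <;> rfl
  rw [combineEvents, h]

theorem pv_mval_empty (f : Int × Int → Int) : pvMval f PySem.Dict.empty = PySem.Dict.empty := rfl

-- one step of A at an event of the pending timestamp: just the two dict updates,
-- which are the projections of B's single update
theorem pv_stepA_same (t : Int) (d : PySem.Dict Int (Int × Int)) (acc : List (Int × Int × Int × Int))
    (row p r : Int) :
    pvStepA (some t, pvMval Prod.fst d, pvMval Prod.snd d, acc) (t, row, p, r) =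
      (some t, pvMval Prod.fst (pvUpdB d (t, row, p, r)), pvMval Prod.snd (pvUpdB d (t, row, p, r)), acc) := by
  rcases hdg : d.getD row (0, 0) with ⟨v1, v2⟩
  have hd1 := pv_getD_mval Prod.fst d row (0, 0)
  have hd2 := pv_getD_mval Prod.snd d row (0, 0)
  rw [hdg] at hd1 hd2
  simp only at hd1 hd2
  simp [pvStepA, pvUpdB, pvPRStep, hdg, pv_mval_insert, hd1, hd2]

theorem pv_stepA_diff (t te : Int) (hne : te ≠ t) (d : PySem.Dict Int (Int × Int))
    (acc : List (Int × Int × Int × Int)) (row p r : Int) :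
    pvStepA (some t, pvMval Prod.fst d, pvMval Prod.snd d, acc) (te, row, p, r) =
      (some te, pvMval Prod.fst (pvUpdB PySem.Dict.empty (te, row, p, r)),
       pvMval Prod.snd (pvUpdB PySem.Dict.empty (te, row, p, r)),
       acc ++ pvOutputPendingA t (pvMval Prod.fst d) (pvMval Prod.snd d)) := by
  simp [pvStepA, pvUpdB, pvPRStep, pv_mval_insert, pv_mval_empty, hne]

theorem pv_stepA_none (acc : List (Int × Int × Int × Int)) (te row p r : Int) :
    pvStepA (none, PySem.Dict.empty, PySem.Dict.empty, acc) (te, row, p, r) =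
      (some te, pvMval Prod.fst (pvUpdB PySem.Dict.empty (te, row, p, r)),
       pvMval Prod.snd (pvUpdB PySem.Dict.empty (te, row, p, r)), acc) := by
  simp [pvStepA, pvUpdB, pvPRStep, pv_mval_insert, pv_mval_empty]

theorem pv_nodup_upd (d : PySem.Dict Int (Int × Int)) (e : Int × Int × Int × Int)
    (h : d.keys.Nodup) : (pvUpdB d e).keys.Nodup := by
  obtain ⟨te, row, p, r⟩ := e
  simp only [pvUpdB]
  exact PySem.Dict.nodup_keys_insert _ _ _ h

theorem pv_mainA (l : List (Int × Int × Int × Int)) (t : Int)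
    (d : PySem.Dict Int (Int × Int)) (acc : List (Int × Int × Int × Int))
    (hnd : d.keys.Nodup) :
    pvFinishA (l.foldl pvStepA (some t, pvMval Prod.fst d, pvMval Prod.snd d, acc)) =
    acc ++ pvFlushB t ((l.takeWhile (fun e' => e'.1 == t)).foldl pvUpdB d)
        ++ pvGroupsB (l.dropWhile (fun e' => e'.1 == t)) := by
  induction l generalizing t d acc with
  | nil =>
      simp [pvFinishA, pvGroupsB, pv_flush_eq t d hnd]
  | cons e tl ih =>
      obtain ⟨te, row, p, r⟩ := e
      rw [List.foldl_cons]
      by_cases hte : te = t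
      · subst hte
        rw [pv_stepA_same, ih te (pvUpdB d (te, row, p, r)) acc (pv_nodup_upd d _ hnd)]
        simp
      · rw [pv_stepA_diff t te hte,
           ih te (pvUpdB PySem.Dict.empty (te, row, p, r)) _
             (pv_nodup_upd _ _ PySem.Dict.nodup_keys_empty)]
        rw [pv_flush_eq t d hnd]
        simp [hte, pvGroupsB]

-- A equals the canonical grouped form, on every input
theorem pv_A_eq_groups (l : List (Int × Int × Int × Int)) : combineEvents l = pvGroupsB l := by
  rw [pv_combine_eq_finish]
  cases l with
  | nil => simp [pvFinishA, pvGroupsB]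
  | cons e tl =>
      obtain ⟨te, row, p, r⟩ := e
      rw [List.foldl_cons, pv_stepA_none,
          pv_mainA tl te (pvUpdB PySem.Dict.empty (te, row, p, r)) []
            (pv_nodup_upd _ _ PySem.Dict.nodup_keys_empty)]
      simp [pvGroupsB]

-- ---- layer 1: B (sort + merge + filter) equals the grouped form on nondecreasing timestamps ----

-- the comparison sorted2 inserts with (reverse = false)
def pvBef2 (a b : Int × Int × Int × Int) : Bool :=
  decide (a.1 < b.1) || (!decide (b.1 < a.1) && decide (a.2.1 < b.2.1))

theorem pv_sorted2_eq_foldl (l : List (Int × Int × Int × Int)) :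
    PySem.List.sorted2 l (fun e => e.1) (fun e => e.2.1) false =
    l.foldl (fun acc x => PySem.List.insertBy pvBef2 x acc) [] := rfl

theorem pv_insertBy_append {α : Type} (bef : α → α → Bool) (x : α) (S acc : List α)
    (h : ∀ y ∈ S, bef x y = false) :
    PySem.List.insertBy bef x (S ++ acc) = S ++ PySem.List.insertBy bef x acc := by
  induction S with
  | nil => rfl
  | cons s S ih =>
      have hs : bef x s = false := h s (by simp)
      simp only [List.cons_append, PySem.List.insertBy, hs]
      simp only [Bool.false_eq_true, if_false]
      rw [ih (fun y hy => h y (by simp [hy]))]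

theorem pv_insertBy_all_before {α : Type} (bef : α → α → Bool) (x : α) (ys : List α)
    (h : ∀ y ∈ ys, bef x y = true) :
    PySem.List.insertBy bef x ys = x :: ys := by
  cases ys with
  | nil => rfl
  | cons y t => simp [PySem.List.insertBy, h y (by simp)]

theorem pv_foldl_insertBy_append {α : Type} (bef : α → α → Bool) (r S acc : List α)
    (h : ∀ x ∈ r, ∀ y ∈ S, bef x y = false) :
    r.foldl (fun a x => PySem.List.insertBy bef x a) (S ++ acc) =
      S ++ r.foldl (fun a x => PySem.List.insertBy bef x a) acc := by
  induction r generalizing acc with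
  | nil => rfl
  | cons e r ih =>
      simp only [List.foldl_cons]
      rw [pv_insertBy_append bef e S acc (fun y hy => h e (by simp) y hy),
          ih _ (fun x hx y hy => h x (by simp [hx]) y hy)]

-- splitting the global sort at a timestamp-group boundary
theorem pv_sorted2_split (g r : List (Int × Int × Int × Int))
    (h : ∀ x ∈ r, ∀ y ∈ g, pvBef2 x y = false) :
    PySem.List.sorted2 (g ++ r) (fun e => e.1) (fun e => e.2.1) false =
      PySem.List.sorted2 g (fun e => e.1) (fun e => e.2.1) false ++
      PySem.List.sorted2 r (fun e => e.1) (fun e => e.2.1) false := by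
  have hmem : ∀ y ∈ PySem.List.sorted2 g (fun e => e.1) (fun e => e.2.1) false, y ∈ g :=
    fun y hy => (PySem.List.sorted2_perm g _ _ _).mem_iff.mp hy
  have hstep := pv_foldl_insertBy_append pvBef2 r
    (PySem.List.sorted2 g (fun e => e.1) (fun e => e.2.1) false) []
    (fun x hx y hy => h x hx y (hmem y hy))
  rw [List.append_nil] at hstep
  rw [pv_sorted2_eq_foldl (g ++ r), List.foldl_append, ← pv_sorted2_eq_foldl g, hstep,
      ← pv_sorted2_eq_foldl r]

theorem pv_insertBy_congr {α : Type} (b1 b2 : α → α → Bool) (x : α) (ys : List α)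
    (h : ∀ y ∈ ys, b1 x y = b2 x y) :
    PySem.List.insertBy b1 x ys = PySem.List.insertBy b2 x ys := by
  induction ys with
  | nil => rfl
  | cons y t ih =>
      simp only [PySem.List.insertBy, h y (by simp)]
      rw [ih (fun z hz => h z (by simp [hz]))]

theorem pv_foldl_ins_congr {α : Type} (b1 b2 : α → α → Bool) (P : α → Prop)
    (hag : ∀ x y, P x → P y → b1 x y = b2 x y) (l : List α) :
    ∀ (acc : List α), (∀ x ∈ l, P x) → (∀ y ∈ acc, P y) →
    l.foldl (fun a x => PySem.List.insertBy b1 x a) acc =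
      l.foldl (fun a x => PySem.List.insertBy b2 x a) acc := by
  induction l with
  | nil => intro acc _ _; rfl
  | cons e l ih =>
      intro acc hl hacc
      simp only [List.foldl_cons]
      rw [pv_insertBy_congr b1 b2 e acc (fun y hy => hag e y (hl e (by simp)) (hacc y hy))]
      exact ih _ (fun x hx => hl x (by simp [hx]))
        (fun y hy => by
          rcases (PySem.List.mem_insertBy b2 e y acc).mp hy with h | h
          · exact h ▸ hl e (by simp)
          · exact hacc y h)

-- inside one timestamp group the (time, row) sort is the stable sort by row
theorem pv_sorted2_const (g : List (Int × Int × Int × Int)) (t : Int)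
    (h : ∀ e ∈ g, e.1 = t) :
    PySem.List.sorted2 g (fun e => e.1) (fun e => e.2.1) false =
      PySem.List.sorted g (fun e => e.2.1) false := by
  rw [pv_sorted2_eq_foldl, PySem.List.sorted_eq_foldl_insertBy]
  exact pv_foldl_ins_congr pvBef2 (fun a b => decide (a.2.1 < b.2.1)) (fun e => e.1 = t)
    (fun x y hx hy => by simp [pvBef2, hx, hy]) g [] h (by simp)

-- the sorted distinct rows of a group, and a row's block of events
def pvRowsS (g : List (Int × Int × Int × Int)) : List Int :=
  PySem.List.sorted (PySem.Set.ofList (g.map (fun e => e.2.1))) (fun x => x) false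

def pvF (g : List (Int × Int × Int × Int)) (r : Int) : List (Int × Int × Int × Int) :=
  g.filter (fun e => e.2.1 == r)

theorem pv_rows_pairwise (g : List (Int × Int × Int × Int)) :
    (pvRowsS g).Pairwise (· < ·) := PySem.List.sorted_ofList_pairwise_lt _

theorem pv_mem_rows (g : List (Int × Int × Int × Int)) (r : Int) :
    r ∈ pvRowsS g ↔ r ∈ g.map (fun e => e.2.1) := by
  unfold pvRowsS
  rw [PySem.List.mem_sorted, PySem.Set.mem_ofList]

-- split a strictly increasing Int list below/above rx
theorem pv_sorted_split_lt (l : List Int) (rx : Int) (hpw : l.Pairwise (· < ·)) :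
    (∀ a ∈ l.takeWhile (fun a => decide (a < rx)), a < rx) ∧
    (∀ b ∈ l.dropWhile (fun a => decide (a < rx)), rx ≤ b) := by
  induction l with
  | nil => simp
  | cons a t ih =>
      rcases List.pairwise_cons.mp hpw with ⟨ha, ht⟩
      by_cases hlt : a < rx
      · constructor
        · intro x hx
          rw [List.takeWhile_cons, if_pos (by simpa using hlt)] at hx
          rcases List.mem_cons.mp hx with hx | hx
          · exact hx ▸ hlt
          · exact (ih ht).1 x hx
        · intro b hb
          rw [List.dropWhile_cons, if_pos (by simpa using hlt)] at hb
          exact (ih ht).2 b hb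
      · constructor
        · intro x hx
          rw [List.takeWhile_cons, if_neg (by simpa using hlt)] at hx
          simp at hx
        · intro b hb
          rw [List.dropWhile_cons, if_neg (by simpa using hlt)] at hb
          rcases List.mem_cons.mp hb with hb | hb
          · subst hb; omega
          · have := ha b hb; omega

-- STABILITY: the stable sort by row is the concatenation of the original row blocks,
-- taken in sorted row order
theorem pv_sorted_row_blocks (g : List (Int × Int × Int × Int)) :
    PySem.List.sorted g (fun e => e.2.1) false = (pvRowsS g).flatMap (pvF g) := by
  induction g using List.reverseRecOn with
  | nil => rfl
  | append_singleton g x ih =>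
      obtain ⟨xt, xr, xp, xq⟩ := x
      have hsorted : PySem.List.sorted (g ++ [(xt, xr, xp, xq)]) (fun e => e.2.1) false =
          PySem.List.insertBy (fun a b => decide (a.2.1 < b.2.1)) (xt, xr, xp, xq)
            (PySem.List.sorted g (fun e => e.2.1) false) := by
        rw [PySem.List.sorted_eq_foldl_insertBy, PySem.List.sorted_eq_foldl_insertBy,
            List.foldl_append, List.foldl_cons, List.foldl_nil]
      set A := (pvRowsS g).takeWhile (fun a => decide (a < xr)) with hA
      set B := (pvRowsS g).dropWhile (fun a => decide (a < xr)) with hB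
      have hAB : A ++ B = pvRowsS g := List.takeWhile_append_dropWhile
      have hAlt : ∀ a ∈ A, a < xr := (pv_sorted_split_lt _ xr (pv_rows_pairwise g)).1
      have hBge : ∀ b ∈ B, xr ≤ b := (pv_sorted_split_lt _ xr (pv_rows_pairwise g)).2
      have hpwA : A.Pairwise (· < ·) :=
        (pv_rows_pairwise g).sublist (hA ▸ List.takeWhile_sublist _)
      have hpwB : B.Pairwise (· < ·) :=
        (pv_rows_pairwise g).sublist (hB ▸ List.dropWhile_sublist _)
      have hFapp : ∀ r, pvF (g ++ [(xt, xr, xp, xq)]) r =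
          pvF g r ++ (if xr = r then [(xt, xr, xp, xq)] else []) := by
        intro r
        unfold pvF
        rw [List.filter_append]
        congr 1
        by_cases hr : xr = r
        · subst hr; simp
        · simp [hr]
      have hrows_map : pvRowsS (g ++ [(xt, xr, xp, xq)]) =
          PySem.List.sorted (PySem.Set.add (PySem.Set.ofList (g.map (fun e => e.2.1))) xr)
            (fun y => y) false := by
        unfold pvRowsS
        rw [List.map_append, List.map_cons, List.map_nil, PySem.Set.ofList_append_singleton]
      have hlow : ∀ S : List Int, (∀ r ∈ S, r ≤ xr) →
          ∀ y ∈ S.flatMap (pvF g), (fun a b => decide (a.2.1 < b.2.1)) (xt, xr, xp, xq) y = false := by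
        intro S hS y hy
        rcases List.mem_flatMap.mp hy with ⟨r, hr, hyr⟩
        have h1 : y.2.1 = r := by simpa using (List.mem_filter.mp hyr).2
        have h2 := hS r hr
        simp only [decide_eq_false_iff_not, not_lt]
        omega
      have hhigh : ∀ S : List Int, (∀ r ∈ S, xr < r) →
          ∀ y ∈ S.flatMap (pvF g), (fun a b => decide (a.2.1 < b.2.1)) (xt, xr, xp, xq) y = true := by
        intro S hS y hy
        rcases List.mem_flatMap.mp hy with ⟨r, hr, hyr⟩
        have h1 : y.2.1 = r := by simpa using (List.mem_filter.mp hyr).2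
        have h2 := hS r hr
        simp only [decide_eq_true_eq]
        omega
      by_cases hmem : xr ∈ pvRowsS g
      · -- xr already a row of g: the row list is unchanged, x lands at the end of its block
        have hrxB : xr ∈ B := by
          rcases List.mem_append.mp (hAB ▸ hmem) with h | h
          · exact absurd (hAlt xr h) (lt_irrefl xr)
          · exact h
        obtain ⟨Bt, hBsplit⟩ : ∃ t, B = xr :: t := by
          cases hBcase : B with
          | nil => rw [hBcase] at hrxB; simp at hrxB
          | cons Bh Bt =>
              rw [hBcase] at hrxB
              rcases List.mem_cons.mp hrxB with heq | hmem'
              · exact ⟨Bt, by rw [heq]⟩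
              · exfalso
                have h1 : Bh < xr :=
                  (List.pairwise_cons.mp (hBcase ▸ hpwB)).1 xr hmem'
                have h2 : xr ≤ Bh := hBge Bh (by rw [hBcase]; simp)
                omega
        have hBt_gt : ∀ b ∈ Bt, xr < b := (List.pairwise_cons.mp (hBsplit ▸ hpwB)).1
        have hrows_eq : pvRowsS (g ++ [(xt, xr, xp, xq)]) = pvRowsS g := by
          rw [hrows_map, PySem.Set.add_of_mem ((PySem.Set.mem_ofList _ _).mpr
            (by simpa using (pv_mem_rows g xr).mp hmem))]
          rfl
        rw [hsorted, ih, hrows_eq, ← hAB, hBsplit]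
        have hsplit1 : (A ++ xr :: Bt).flatMap (pvF g) =
            ((A ++ [xr]).flatMap (pvF g)) ++ Bt.flatMap (pvF g) := by
          rw [← List.flatMap_append, List.append_assoc]; rfl
        rw [hsplit1, pv_insertBy_append _ _ _ _
              (hlow (A ++ [xr]) (by
                intro r hr
                rcases List.mem_append.mp hr with h | h
                · exact le_of_lt (hAlt r h)
                · simp at h; omega)),
            pv_insertBy_all_before _ _ _ (hhigh Bt hBt_gt)]
        have hcA : List.flatMap (pvF (g ++ [(xt, xr, xp, xq)])) A = List.flatMap (pvF g) A :=
          List.flatMap_congr (fun r hr => by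
            rw [hFapp r, if_neg (by have := hAlt r hr; omega), List.append_nil])
        have hcBt : List.flatMap (pvF (g ++ [(xt, xr, xp, xq)])) Bt = List.flatMap (pvF g) Bt :=
          List.flatMap_congr (fun r hr => by
            rw [hFapp r, if_neg (by have := hBt_gt r hr; omega), List.append_nil])
        rw [List.flatMap_append, List.flatMap_append]
        simp only [List.flatMap_cons, List.flatMap_nil, List.append_nil]
        rw [hcA, hcBt, hFapp xr, if_pos rfl]
        simp
      · -- xr is a fresh row: it is inserted into the row list, with block [x]
        have hBgt : ∀ b ∈ B, xr < b := by
          intro b hb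
          have h1 := hBge b hb
          have h2 : b ≠ xr := by
            intro he
            exact hmem (hAB ▸ List.mem_append.mpr (Or.inr (he ▸ hb)))
          omega
        have hnotmap : xr ∉ g.map (fun e => e.2.1) := fun hc => hmem ((pv_mem_rows g xr).mpr hc)
        have hFrx : pvF g xr = [] := by
          unfold pvF
          rw [List.filter_eq_nil_iff]
          intro e he
          simp only [beq_iff_eq]
          intro hrow
          exact hnotmap (List.mem_map.mpr ⟨e, he, hrow⟩)
        have hrows_eq : pvRowsS (g ++ [(xt, xr, xp, xq)]) = A ++ xr :: B := by
          rw [hrows_map, PySem.Set.add_of_not_mem (fun hc =>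
            hnotmap ((PySem.Set.mem_ofList _ _).mp hc))]
          apply PySem.List.sorted_id_eq_of_perm_of_pairwise
          · have p1 : (A ++ xr :: B).Perm (xr :: (A ++ B)) := List.perm_middle
            rw [hAB] at p1
            have p2 : (xr :: pvRowsS g).Perm
                (xr :: PySem.Set.ofList (g.map (fun e => e.2.1))) :=
              List.Perm.cons _ (PySem.List.sorted_perm _ _ _)
            have p3 : (xr :: PySem.Set.ofList (g.map (fun e => e.2.1))).Perm
                (PySem.Set.ofList (g.map (fun e => e.2.1)) ++ [xr]) :=
              (List.perm_append_singleton _ _).symm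
            exact (p1.trans p2).trans p3
          · rw [List.pairwise_append]
            refine ⟨hpwA.imp le_of_lt, List.pairwise_cons.mpr ⟨hBge, hpwB.imp le_of_lt⟩, ?_⟩
            intro a ha b hb
            have h1 := hAlt a ha
            rcases List.mem_cons.mp hb with hb | hb
            · omega
            · have := hBgt b hb; omega
        rw [hsorted, ih, hrows_eq, ← hAB]
        rw [List.flatMap_append,
            pv_insertBy_append _ _ _ _ (hlow A (fun r hr => le_of_lt (hAlt r hr))),
            pv_insertBy_all_before _ _ _ (hhigh B hBgt)]
        have hcA : List.flatMap (pvF (g ++ [(xt, xr, xp, xq)])) A = List.flatMap (pvF g) A :=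
          List.flatMap_congr (fun r hr => by
            rw [hFapp r, if_neg (by have := hAlt r hr; omega), List.append_nil])
        have hcB : List.flatMap (pvF (g ++ [(xt, xr, xp, xq)])) B = List.flatMap (pvF g) B :=
          List.flatMap_congr (fun r hr => by
            rw [hFapp r, if_neg (by have := hBgt r hr; omega), List.append_nil])
        rw [List.flatMap_append]
        simp only [List.flatMap_cons]
        rw [hcA, hcB, hFapp xr, if_pos rfl, hFrx]
        simp

-- ---- the merge pass over the sorted blocks ----

-- the combined (press, release) pair of one row's block
def pvPRfold (blk : List (Int × Int × Int × Int)) : Int × Int := blk.foldl pvPRStep (0, 0)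

theorem pv_merge_run (es : List (Int × Int × Int × Int)) (t r : Int)
    (h : ∀ e ∈ es, e.1 = t ∧ e.2.1 = r) (acc : List (Int × Int × Int × Int)) (pr : Int × Int) :
    es.foldl pvMergeStep (acc ++ [(t, r, pr.1, pr.2)]) =
      acc ++ [(t, r, (es.foldl pvPRStep pr).1, (es.foldl pvPRStep pr).2)] := by
  induction es generalizing pr with
  | nil => rfl
  | cons e es ih =>
      obtain ⟨et, er, ep, eq⟩ := e
      obtain ⟨h1, h2⟩ := h (et, er, ep, eq) (by simp)
      simp only at h1 h2
      subst h1; subst h2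
      simp only [List.foldl_cons]
      have hstep : pvMergeStep (acc ++ [(et, er, pr.1, pr.2)]) (et, er, ep, eq) =
          acc ++ [(et, er, (pvPRStep pr (et, er, ep, eq)).1, (pvPRStep pr (et, er, ep, eq)).2)] := by
        simp [pvMergeStep, pvPRStep]
      rw [hstep, ih (fun e he => h e (by simp [he]))]

theorem pv_merge_block (t r : Int) (blk : List (Int × Int × Int × Int)) (hne : blk ≠ [])
    (hb : ∀ e ∈ blk, e.1 = t ∧ e.2.1 = r)
    (acc : List (Int × Int × Int × Int)) (hacc : ∀ y ∈ acc, ¬(y.1 = t ∧ y.2.1 = r)) :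
    blk.foldl pvMergeStep acc = acc ++ [(t, r, (pvPRfold blk).1, (pvPRfold blk).2)] := by
  cases blk with
  | nil => exact absurd rfl hne
  | cons e es =>
      obtain ⟨et, er, ep, eq⟩ := e
      obtain ⟨h1, h2⟩ := hb (et, er, ep, eq) (by simp)
      simp only at h1 h2
      subst h1; subst h2
      have hb0 : ∀ z : Int, PySem.Int.bor 0 z = z := fun z => by
        rw [PySem.Int.bor_comm]; exact PySem.Int.bor_zero z
      have hfirst : pvMergeStep acc (et, er, ep, eq) =
          acc ++ [(et, er, (pvPRStep (0, 0) (et, er, ep, eq)).1, (pvPRStep (0, 0) (et, er, ep, eq)).2)] := by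
        unfold pvMergeStep pvPRStep
        cases hl : acc.getLast? with
        | none => simp [hb0]
        | some last =>
            have hlast := hacc last (List.mem_of_getLast? hl)
            have hcond : (last.1 == et && last.2.1 == er) = false := by
              by_cases hc1 : last.1 = et
              · by_cases hc2 : last.2.1 = er
                · exact absurd ⟨hc1, hc2⟩ hlast
                · simp [hc2]
              · simp [hc1]
            simp [hcond, hb0]
      rw [List.foldl_cons, hfirst,
          pv_merge_run es et er (fun e he => hb e (by simp [he])) acc _]
      rfl

theorem pv_merge_blocks (g : List (Int × Int × Int × Int)) (t : Int) (srows : List Int)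
    (hpw : srows.Pairwise (· < ·))
    (hblk : ∀ r ∈ srows, pvF g r ≠ [] ∧ ∀ e ∈ pvF g r, e.1 = t ∧ e.2.1 = r) :
    ∀ (acc : List (Int × Int × Int × Int)),
      (∀ y ∈ acc, ∀ r ∈ srows, ¬(y.1 = t ∧ y.2.1 = r)) →
      (srows.flatMap (pvF g)).foldl pvMergeStep acc =
        acc ++ srows.map (fun r => (t, r, (pvPRfold (pvF g r)).1, (pvPRfold (pvF g r)).2)) := by
  induction srows with
  | nil => intro acc _; simp
  | cons r rs ih =>
      intro acc hacc
      rcases List.pairwise_cons.mp hpw with ⟨hr_lt, hpw'⟩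
      simp only [List.flatMap_cons]
      rw [List.foldl_append]
      rw [pv_merge_block t r (pvF g r) (hblk r (by simp)).1 (hblk r (by simp)).2 acc
            (fun y hy => hacc y hy r (by simp))]
      rw [ih hpw' (fun r' hr' => hblk r' (by simp [hr']))
            (acc ++ [(t, r, (pvPRfold (pvF g r)).1, (pvPRfold (pvF g r)).2)])
            (fun y hy r' hr' => by
              rcases List.mem_append.mp hy with h | h
              · exact hacc y h r' (by simp [hr'])
              · simp at h
                rintro ⟨-, h2⟩
                rw [h] at h2
                simp at h2
                have := hr_lt r' hr'
                omega)]
      simp [List.map_cons]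

-- ---- the dict of one group, read back per row ----

theorem pv_getD_foldl_updB (g : List (Int × Int × Int × Int)) (r : Int) :
    ∀ d : PySem.Dict Int (Int × Int),
    (g.foldl pvUpdB d).getD r (0, 0) = (pvF g r).foldl pvPRStep (d.getD r (0, 0)) := by
  induction g with
  | nil => intro d; rfl
  | cons e es ih =>
      intro d
      simp only [List.foldl_cons]
      rw [ih]
      unfold pvF
      rw [List.filter_cons]
      by_cases he : e.2.1 = r
      · rw [if_pos (by simp [he]), List.foldl_cons]
        unfold pvF at *
        congr 1
        unfold pvUpdB
        rw [PySem.Dict.getD_insert, if_pos he.symm, he]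
      · rw [if_neg (by simp [he])]
        unfold pvF at *
        congr 1
        unfold pvUpdB
        rw [PySem.Dict.getD_insert, if_neg (fun hc => he hc.symm)]

theorem pv_keys_foldl_updB (g : List (Int × Int × Int × Int)) :
    (g.foldl pvUpdB PySem.Dict.empty).keys = PySem.Set.ofList (g.map (fun e => e.2.1)) := by
  have h : (g.foldl pvUpdB PySem.Dict.empty).keys =
      PySem.Set.update (PySem.Dict.empty (κ := Int) (ν := Int × Int)).keys
        (g.map (fun e => e.2.1)) :=
    PySem.Dict.keys_foldl_insert_key g (fun e => e.2.1)
      (fun d e => pvPRStep (d.getD e.2.1 (0, 0)) e) PySem.Dict.empty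
  rw [h, PySem.Dict.keys_empty, PySem.Set.update_nil_left]

theorem pv_filterMap_map (rs : List Int) (f : Int → (Int × Int × Int × Int)) :
    rs.filterMap (fun r => if (f r).2.2.1 ≠ 0 ∨ (f r).2.2.2 ≠ 0 then some (f r) else none) =
      (rs.map f).filter (fun e => decide (e.2.2.1 ≠ 0) || decide (e.2.2.2 ≠ 0)) := by
  induction rs with
  | nil => rfl
  | cons r rs ih =>
      simp only [List.filterMap_cons, List.map_cons, List.filter_cons]
      by_cases h : (f r).2.2.1 ≠ 0 ∨ (f r).2.2.2 ≠ 0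
      · rw [if_pos h, show (decide ((f r).2.2.1 ≠ 0) || decide ((f r).2.2.2 ≠ 0)) = true by
            simpa using h, ih]
        rfl
      · rw [if_neg h, show (decide ((f r).2.2.1 ≠ 0) || decide ((f r).2.2.2 ≠ 0)) = false by
            simpa using h, ih]
        rfl

theorem pv_flush_group (t : Int) (g : List (Int × Int × Int × Int)) :
    pvFlushB t (g.foldl pvUpdB PySem.Dict.empty) =
      ((pvRowsS g).map (fun r => (t, r, (pvPRfold (pvF g r)).1, (pvPRfold (pvF g r)).2))).filter
        (fun e => decide (e.2.2.1 ≠ 0) || decide (e.2.2.2 ≠ 0)) := by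
  have hget : ∀ r, (g.foldl pvUpdB PySem.Dict.empty).getD r (0, 0) = pvPRfold (pvF g r) := by
    intro r
    rw [pv_getD_foldl_updB, PySem.Dict.getD_empty]
    rfl
  unfold pvFlushB
  rw [pv_keys_foldl_updB,
      List.filterMap_congr
        (g := fun r => if (pvPRfold (pvF g r)).1 ≠ 0 ∨ (pvPRfold (pvF g r)).2 ≠ 0 then
          some (t, r, (pvPRfold (pvF g r)).1, (pvPRfold (pvF g r)).2) else none)
        (fun r _ => by rw [hget r])]
  exact pv_filterMap_map _ (fun r => (t, r, (pvPRfold (pvF g r)).1, (pvPRfold (pvF g r)).2))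

-- timestamps after the first group are strictly larger
theorem pv_dropWhile_gt (tl : List (Int × Int × Int × Int)) (t : Int)
    (hpw : tl.Pairwise (fun a b => a.1 ≤ b.1)) (hle : ∀ x ∈ tl, t ≤ x.1) :
    ∀ x ∈ tl.dropWhile (fun e => e.1 == t), t < x.1 := by
  induction tl with
  | nil => simp
  | cons a r ih =>
      rcases List.pairwise_cons.mp hpw with ⟨ha, hr⟩
      intro x hx
      rw [List.dropWhile_cons] at hx
      by_cases hat : a.1 = t
      · rw [if_pos (by simp [hat])] at hx
        exact ih hr (fun y hy => hle y (by simp [hy])) x hx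
      · rw [if_neg (by simp [hat])] at hx
        have hta : t < a.1 := by
          have := hle a (by simp); omega
        rcases List.mem_cons.mp hx with hx | hx
        · subst hx; exact hta
        · have := ha x hx; omega

-- ---- main induction: one timestamp group at a time ----
theorem pv_main2 (n : Nat) : ∀ (l : List (Int × Int × Int × Int)), l.length ≤ n →
    ∀ (acc : List (Int × Int × Int × Int)),
    l.Pairwise (fun a b => a.1 ≤ b.1) → (∀ y ∈ acc, ∀ x ∈ l, y.1 < x.1) →
    ((PySem.List.sorted2 l (fun e => e.1) (fun e => e.2.1) false).foldl pvMergeStep acc).filter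
        (fun e => decide (e.2.2.1 ≠ 0) || decide (e.2.2.2 ≠ 0)) =
      acc.filter (fun e => decide (e.2.2.1 ≠ 0) || decide (e.2.2.2 ≠ 0)) ++ pvGroupsB l := by
  induction n with
  | zero =>
      intro l hlen acc _ _
      rw [List.eq_nil_of_length_eq_zero (Nat.le_zero.mp hlen)]
      rw [pv_sorted2_eq_foldl]
      simp [pvGroupsB]
  | succ n ih =>
      intro l hlen acc hpw hacc
      cases l with
      | nil =>
          rw [pv_sorted2_eq_foldl]
          simp [pvGroupsB]
      | cons e tl =>
          rcases List.pairwise_cons.mp hpw with ⟨hehd, hpwtl⟩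
          have hG : pvGroupsB (e :: tl) =
              pvFlushB e.1 ((e :: tl.takeWhile (fun e' => e'.1 == e.1)).foldl pvUpdB PySem.Dict.empty) ++
              pvGroupsB (tl.dropWhile (fun e' => e'.1 == e.1)) := by
            rw [pvGroupsB]
          rw [hG]
          -- the first timestamp group and the rest
          have hsplit : e :: tl =
              (e :: tl.takeWhile (fun e' => e'.1 == e.1)) ++ tl.dropWhile (fun e' => e'.1 == e.1) := by
            rw [List.cons_append, List.takeWhile_append_dropWhile]
          have hg : ∀ x ∈ e :: tl.takeWhile (fun e' => e'.1 == e.1), x.1 = e.1 := by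
            intro x hx
            rcases List.mem_cons.mp hx with hx | hx
            · rw [hx]
            · simpa using List.mem_takeWhile_imp hx
          have hrest_gt : ∀ x ∈ tl.dropWhile (fun e' => e'.1 == e.1), e.1 < x.1 :=
            pv_dropWhile_gt tl e.1 hpwtl hehd
          have hrest_mem : ∀ x ∈ tl.dropWhile (fun e' => e'.1 == e.1), x ∈ tl :=
            fun x hx => (List.dropWhile_sublist _).mem hx
          -- split the sort at the group boundary
          rw [hsplit, pv_sorted2_split _ _ (fun x hx y hy => by
                have h1 := hrest_gt x hx
                have h2 := hg y hy
                have h3 : ¬ x.1 < y.1 := by omega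
                have h4 : y.1 < x.1 := by omega
                simp [pvBef2, h3, h4]),
              List.foldl_append]
          -- the group part: stable row sort, then one merged entry per row
          rw [pv_sorted2_const _ e.1 hg, pv_sorted_row_blocks]
          have hblk : ∀ r ∈ pvRowsS (e :: tl.takeWhile (fun e' => e'.1 == e.1)),
              pvF (e :: tl.takeWhile (fun e' => e'.1 == e.1)) r ≠ [] ∧
              ∀ x ∈ pvF (e :: tl.takeWhile (fun e' => e'.1 == e.1)) r, x.1 = e.1 ∧ x.2.1 = r := by
            intro r hr
            constructor
            · rcases List.mem_map.mp ((pv_mem_rows _ r).mp hr) with ⟨x, hx, hxr⟩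
              exact List.ne_nil_of_mem (List.mem_filter.mpr ⟨hx, by simp [hxr]⟩)
            · intro x hx
              rcases List.mem_filter.mp hx with ⟨hx1, hx2⟩
              exact ⟨hg x hx1, by simpa using hx2⟩
          rw [pv_merge_blocks _ e.1 _ (pv_rows_pairwise _) hblk acc
                (fun y hy r _ => fun hc =>
                  absurd (hacc y hy e (by simp)) (by omega))]
          -- recurse on the rest
          have hlen' : (tl.dropWhile (fun e' => e'.1 == e.1)).length ≤ n := by
            have h1 := List.length_dropWhile_le (fun e' => e'.1 == e.1) tl
            simp only [List.length_cons] at hlen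
            omega
          rw [ih _ hlen' _
                (hpwtl.sublist (List.dropWhile_sublist _))
                (fun y hy x hx => by
                  rcases List.mem_append.mp hy with h | h
                  · exact hacc y h x (by simp [hrest_mem x hx])
                  · rcases List.mem_map.mp h with ⟨r, _, hyr⟩
                    rw [← hyr]
                    exact hrest_gt x hx)]
          -- assemble: the filtered merged group is exactly A's flushed group
          rw [List.filter_append, ← pv_flush_group, List.append_assoc]

-- ===== VERDICT (by name: the statement is the Claim_ definition above) =====
theorem combineEvents_spec : Claim_equal_combineEvents := by
  intro l _ hpre
  unfold Spec_combineEvents combineEvents_alt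
  rw [pv_A_eq_groups]
  have h := pv_main2 l.length l le_rfl [] hpre (by simp)
  simp only [List.filter_nil, List.nil_append] at h
  exact h.symm
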